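-- pv_equiv track=rewrite | github.com/tmavrich/pdm_utils | tests/integration/test_import_genome2.py | filter_genome_data
-- ===== SOURCE A (Python) =====
-- def filter_genome_data(list_of_sql_results, phage_id):
--     """."""
--     x = 0
--     output_dict = {}
--     while x < len(list_of_sql_results):
--         if list_of_sql_results[x]["PhageID"] == phage_id:
--             output_dict = list_of_sql_results[x]
--         else:
--             pass
--         x += 1
--     return output_dict
-- ===== SOURCE B (Python) =====
-- def filter_genome_data(list_of_sql_results, phage_id):
--     """."""
--     for row in reversed(list_of_sql_results):
--         if row["PhageID"] == phage_id:
--             return row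
--     return {}
-- ===== Notes on version B (the rewrite author's own statement) =====
-- stated objective: idiomatic
-- what changed: Replaces the forward index-based while loop that keeps overwriting an accumulator with a reverse iteration that returns the first matching row immediately (no accumulator, early termination).
import Mathlib
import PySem

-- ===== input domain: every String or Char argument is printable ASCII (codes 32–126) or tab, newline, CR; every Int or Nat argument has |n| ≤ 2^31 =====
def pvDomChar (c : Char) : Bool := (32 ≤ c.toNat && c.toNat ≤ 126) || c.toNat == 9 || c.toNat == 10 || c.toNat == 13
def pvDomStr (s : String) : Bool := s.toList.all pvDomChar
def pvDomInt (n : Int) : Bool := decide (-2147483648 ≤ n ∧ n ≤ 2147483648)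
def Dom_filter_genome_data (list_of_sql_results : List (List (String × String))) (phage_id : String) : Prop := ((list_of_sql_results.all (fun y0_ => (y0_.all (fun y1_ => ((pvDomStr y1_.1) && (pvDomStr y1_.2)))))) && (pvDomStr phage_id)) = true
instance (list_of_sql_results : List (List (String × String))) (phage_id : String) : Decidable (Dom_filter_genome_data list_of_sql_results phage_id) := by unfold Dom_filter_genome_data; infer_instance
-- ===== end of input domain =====

-- B replaces A's forward keep-last accumulator loop by an idiomatic reverse scan with early return; equal on rows that all carry a "PhageID" key.


-- shared dict primitive: row["PhageID"] as first-match association-list lookup (none = KeyError)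
def pvGetPhage (row : List (String × String)) : Option String :=
  (row.find? (fun kv => kv.1 == "PhageID")).map (·.2)

-- ===== PORT A =====
-- A: index-based while loop over the list, keeping the LAST matching row in output_dict.
def filter_genome_data (list_of_sql_results : List (List (String × String))) (phage_id : String) : List (String × String) :=
  list_of_sql_results.foldl
    (fun output_dict row => if pvGetPhage row = some phage_id then row else output_dict) []

-- ===== PORT B =====
-- B: scan the reversed list, returning the first match immediately; [] if none.
def fgRevScan : List (List (String × String)) → String → List (String × String)
  | [], _ => []
  | row :: rest, phage_id =>
    if pvGetPhage row = some phage_id then row else fgRevScan rest phage_id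

def filter_genome_data_alt (list_of_sql_results : List (List (String × String))) (phage_id : String) : List (String × String) :=
  fgRevScan list_of_sql_results.reverse phage_id

-- ===== PRECONDITION & SPEC =====
-- Pre_ excludes exactly the inputs where Python A raises KeyError: a row without a "PhageID" key.
def Pre_filter_genome_data (list_of_sql_results : List (List (String × String))) (phage_id : String) : Prop :=
  ∀ row ∈ list_of_sql_results, (pvGetPhage row).isSome = true

instance (list_of_sql_results : List (List (String × String))) (phage_id : String) : Decidable (Pre_filter_genome_data list_of_sql_results phage_id) := by unfold Pre_filter_genome_data; infer_instance

def pvWitness_filter_genome_data : (List (List (String × String))) × String :=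
  ([[("PhageID", "Trixie"), ("HostGenus", "Mycobacterium")], [("PhageID", "L5")]], "Trixie")

def Spec_filter_genome_data (list_of_sql_results : List (List (String × String))) (phage_id : String) (out : List (String × String)) : Prop := out = filter_genome_data_alt list_of_sql_results phage_id
instance (list_of_sql_results : List (List (String × String))) (phage_id : String) (out : List (String × String)) : Decidable (Spec_filter_genome_data list_of_sql_results phage_id out) := by unfold Spec_filter_genome_data; infer_instance

-- ===== CLAIM (what is proved, stated in full; the proofs are below) =====
def Claim_equal_filter_genome_data : Prop := ∀ (list_of_sql_results : List (List (String × String))) (phage_id : String), Dom_filter_genome_data list_of_sql_results phage_id → Pre_filter_genome_data list_of_sql_results phage_id → Spec_filter_genome_data list_of_sql_results phage_id (filter_genome_data list_of_sql_results phage_id)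

-- ===== LEMMAS AND PROOFS =====
theorem fg_eq (l : List (List (String × String))) (p : String) :
    filter_genome_data l p = filter_genome_data_alt l p := by
  unfold filter_genome_data filter_genome_data_alt
  induction l using List.reverseRecOn with
  | nil => simp [fgRevScan]
  | append_singleton l row ih =>
    rw [List.foldl_append, List.reverse_append]
    simp only [List.foldl_cons, List.foldl_nil, List.reverse_cons, List.reverse_nil,
      List.nil_append, List.singleton_append, fgRevScan]
    split <;> simp_all

-- ===== VERDICT (by name: the statement is the Claim_ definition above) =====
theorem filter_genome_data_spec : Claim_equal_filter_genome_data := by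
  intro l p _ _
  unfold Spec_filter_genome_data
  exact fg_eq l p
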